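-- pv_equiv track=rewrite | github.com/Alpha-778/CodeForces-solution-in-Python | 320A Magic Numbers.py | is_magic_number
-- ===== SOURCE A (Python) =====
-- def is_magic_number(n):
--     s = str(n)
--     i = 0
--     while i < len(s):
--         if s[i:i+3] == "144":
--             i += 3
--         elif s[i:i+2] == "14":
--             i += 2
--         elif s[i] == "1":
--             i += 1
--         else:
--             return "NO"
--     return "YES"
-- ===== SOURCE B (Python) =====
-- def is_magic_number(n):
--     # Single pass: count consecutive 4s since the last '1'; None = no '1' seen yet.
--     fours = None
--     for c in str(n):
--         if c == '1':
--             fours = 0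
--         elif c == '4' and fours is not None and fours < 2:
--             fours += 1
--         else:
--             return "NO"
--     return "YES"
-- ===== Notes on version B (the rewrite author's own statement) =====
-- stated objective: alternative
-- what changed: Replaced the greedy multi-way block scanner (matching 144/14/1 by string slices and variable index jumps) with a single character-by-character finite-state pass that keeps a counter of consecutive 4s since the last '1'.
import Mathlib
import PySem

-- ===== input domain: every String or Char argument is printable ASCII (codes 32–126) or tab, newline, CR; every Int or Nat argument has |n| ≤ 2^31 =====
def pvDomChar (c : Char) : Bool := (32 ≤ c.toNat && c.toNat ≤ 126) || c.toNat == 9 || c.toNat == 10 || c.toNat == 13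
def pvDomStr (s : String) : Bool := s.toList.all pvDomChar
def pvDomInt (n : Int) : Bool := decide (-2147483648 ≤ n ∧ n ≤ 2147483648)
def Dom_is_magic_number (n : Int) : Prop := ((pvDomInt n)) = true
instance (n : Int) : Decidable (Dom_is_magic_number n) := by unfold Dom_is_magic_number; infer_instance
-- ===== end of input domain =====

-- ===== PORT A =====
-- B replaces A's greedy slice-based block scanner with a single-pass 4-counter state machine (same O(n) cost, different structure).
-- loop of A: while i < len(s), greedily match "144", then "14", then "1" at position i (slice comparisons), else return "NO".
def pvLoopA : List Char → String
  | [] => "YES"                                   -- loop ended: return "YES"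
  | '1' :: '4' :: '4' :: rest => pvLoopA rest     -- s[i:i+3] == "144": i += 3
  | '1' :: '4' :: rest => pvLoopA rest            -- s[i:i+2] == "14":  i += 2
  | '1' :: rest => pvLoopA rest                   -- s[i] == "1":       i += 1
  | _ => "NO"                                     -- else: return "NO"

def is_magic_number (n : Int) : String :=
  pvLoopA (PySem.Int.toStr n).toList

-- ===== PORT B =====
-- for-loop of B: `fours` is the count of consecutive 4s since the last '1' (none = no '1' seen yet).
def pvLoopB : List Char → Option Int → String
  | [], _ => "YES"
  | c :: rest, fours =>
    if c = '1' then pvLoopB rest (some 0)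
    else if c = '4' ∧ (∃ k, fours = some k ∧ k < 2) then pvLoopB rest (fours.map (· + 1))
    else "NO"

def is_magic_number_alt (n : Int) : String :=
  pvLoopB (PySem.Int.toStr n).toList none

-- ===== PRECONDITION & SPEC =====
def Spec_is_magic_number (n : Int) (out : String) : Prop := out = is_magic_number_alt n
instance (n : Int) (out : String) : Decidable (Spec_is_magic_number n out) := by unfold Spec_is_magic_number; infer_instance

-- ===== CLAIM (what is proved, stated in full; the proofs are below) =====
def Claim_equal_is_magic_number : Prop := ∀ (n : Int), Dom_is_magic_number n → Spec_is_magic_number n (is_magic_number n)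

-- ===== LEMMAS AND PROOFS =====

theorem pvLoop_agree (cs : List Char) :
    pvLoopB cs none = pvLoopA cs ∧
    pvLoopB cs (some 0) = pvLoopA ('1' :: cs) ∧
    pvLoopB cs (some 1) = pvLoopA ('1' :: '4' :: cs) ∧
    pvLoopB cs (some 2) = pvLoopA cs := by
  induction cs with
  | nil => refine ⟨rfl, rfl, rfl, rfl⟩
  | cons c r ih =>
    obtain ⟨ih0, ih1, ih2, ih3⟩ := ih
    by_cases h1 : c = '1'
    · subst h1
      refine ⟨?_, ?_, ?_, ?_⟩ <;> simp [pvLoopB, pvLoopA, ih1]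
    · by_cases h4 : c = '4'
      · subst h4
        refine ⟨?_, ?_, ?_, ?_⟩ <;> simp [pvLoopB, pvLoopA, ih2, ih3]
      · refine ⟨?_, ?_, ?_, ?_⟩ <;> simp [pvLoopB, pvLoopA, h1, h4]

-- ===== VERDICT (by name: the statement is the Claim_ definition above) =====
theorem is_magic_number_spec : Claim_equal_is_magic_number := by
  intro n _
  unfold Spec_is_magic_number is_magic_number is_magic_number_alt
  exact ((pvLoop_agree _).1).symm
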